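-- pv_equiv track=rewrite | github.com/soyonchoi29/finalproject345 | removal_experiment.py | split_assert_blocks
-- ===== SOURCE A (Python) =====
-- def split_assert_blocks(lines):
--     """Split file into (assert ...) blocks and other lines."""
--     all_asserts = []
--     non_assert_lines = []
--     in_assert = False
--     balance = 0
--     current_block = []
--
--     for line in lines:
--         if not in_assert and "(assert" in line:
--             in_assert = True
--             balance = line.count("(") - line.count(")")
--             current_block = [line]
--         elif in_assert:
--             current_block.append(line)
--             balance += line.count("(") - line.count(")")
--             if balance == 0:
--                 all_asserts.append("".join(current_block))
--                 in_assert = False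
--         else:
--             non_assert_lines.append(line)
--
--     return non_assert_lines, all_asserts
-- ===== SOURCE B (Python) =====
-- def _bal(line):
--     return line.count("(") - line.count(")")
--
--
-- def _close_at(lines, k):
--     """Index of the line on which the block opened at lines[k] balances out, or None."""
--     depth = _bal(lines[k])
--     for j in range(k + 1, len(lines)):
--         depth += _bal(lines[j])
--         if depth == 0:
--             return j
--     return None
--
--
-- def split_assert_blocks(lines):
--     """Split file into (assert ...) blocks and other lines."""
--     other, asserts = [], []
--     rest = list(lines)
--     while rest:
--         k = next((i for i, l in enumerate(rest) if "(assert" in l), None)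
--         if k is None:
--             other += rest
--             break
--         other += rest[:k]
--         end = _close_at(rest, k)
--         if end is None:
--             break
--         asserts.append("".join(rest[k:end + 1]))
--         rest = rest[end + 1:]
--     return other, asserts
-- ===== Notes on version B (the rewrite author's own statement) =====
-- stated objective: alternative
-- what changed: Replaced A's one-pass flag-based state machine (in_assert/balance/current_block threaded through every line) with a staged chunk-consuming loop: repeatedly locate the next '(assert' line, find the line on which its paren balance closes with a dedicated helper, slice-and-join that whole block, and continue on the remaining suffix.
import Mathlib
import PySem

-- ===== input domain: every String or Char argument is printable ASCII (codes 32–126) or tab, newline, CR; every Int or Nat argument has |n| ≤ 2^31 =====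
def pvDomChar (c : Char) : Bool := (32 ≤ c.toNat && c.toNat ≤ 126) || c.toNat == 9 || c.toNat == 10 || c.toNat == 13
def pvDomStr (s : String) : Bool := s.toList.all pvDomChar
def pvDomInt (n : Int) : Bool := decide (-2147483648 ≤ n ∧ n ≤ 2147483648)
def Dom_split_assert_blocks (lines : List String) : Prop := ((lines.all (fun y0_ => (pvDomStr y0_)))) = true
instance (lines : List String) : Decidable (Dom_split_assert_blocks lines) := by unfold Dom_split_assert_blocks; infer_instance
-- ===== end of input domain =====

-- B replaces A's flag-based one-pass state machine with a staged chunk-consuming loop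
-- (find next '(assert' line, find the closing line, slice-and-join the block, recurse
-- on the remaining suffix); alternative decomposition, same asymptotic scanning cost.


-- ===== PORT A =====
-- line.count("(") - line.count(")")  (A inline, B's helper _bal)
def parenBalance (line : String) : Int :=
  (PySem.Str.count line "(" : Int) - (PySem.Str.count line ")" : Int)

-- the body of A's for-loop; state = (all_asserts, non_assert_lines, in_assert, balance, current_block)
def stepA (st : List String × List String × Bool × Int × List String) (line : String) :
    List String × List String × Bool × Int × List String :=
  let (alls, nons, inA, bal, cur) := st
  if (!inA && PySem.Str.isIn "(assert" line) then
    (alls, nons, true, parenBalance line, [line])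
  else if inA then
    let cur' := cur ++ [line]
    let bal' := bal + parenBalance line
    if bal' = 0 then (alls ++ [PySem.Str.join "" cur'], nons, false, bal', cur')
    else (alls, nons, true, bal', cur')
  else
    (alls, nons ++ [line], inA, bal, cur)

def split_assert_blocks (lines : List String) : List String × List String :=
  let st := lines.foldl stepA ([], [], false, 0, [])
  (st.2.1, st.1)

-- ===== PORT B =====
-- B's  next((i for i, l in enumerate(rest) if "(assert" in l), None)
def firstAssertIdx : List String → Option Nat
  | [] => none
  | l :: rest =>
    if PySem.Str.isIn "(assert" l then some 0 else (firstAssertIdx rest).map (· + 1)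

-- the for-loop of B's _close_at: j runs over range(k+1, len(lines)); here the third
-- argument is lines[j:], so `depth += _bal(lines[j])` is `depth + parenBalance l`.
def closeLoop (depth : Int) (j : Nat) : List String → Option Nat
  | [] => none
  | l :: rest =>
    let d := depth + parenBalance l
    if d = 0 then some j else closeLoop d (j + 1) rest

-- B's _close_at(lines, k); lines[k] is read via drop/headD (k is always in range
-- at the call site, so the "" default is never used).
def closeAt (lines : List String) (k : Nat) : Option Nat :=
  closeLoop (parenBalance ((lines.drop k).headD "")) (k + 1) (lines.drop (k + 1))

-- B's outer while-loop over the shrinking list `rest`.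
def outerAlt (other asserts rest : List String) : List String × List String :=
  match hk : firstAssertIdx rest with
  | none => (other ++ rest, asserts)
  | some k =>
    let other' := other ++ rest.take k
    match he : closeAt rest k with
    | none => (other', asserts)
    | some e =>
      outerAlt other'
        (asserts ++ [PySem.Str.join "" ((rest.drop k).take (e + 1 - k))])
        (rest.drop (e + 1))
termination_by rest.length
decreasing_by
  have hne : rest ≠ [] := by
    intro h; subst h; simp [firstAssertIdx] at hk
  have : 1 ≤ e + 1 := Nat.le_add_left 1 e
  have hlen : 0 < rest.length := List.length_pos_iff.mpr hne
  simp only [List.length_drop]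
  omega

def split_assert_blocks_alt (lines : List String) : List String × List String :=
  outerAlt [] [] lines

-- ===== PRECONDITION & SPEC =====
def Spec_split_assert_blocks (lines : List String) (out : List String × List String) : Prop := out = split_assert_blocks_alt lines
instance (lines : List String) (out : List String × List String) : Decidable (Spec_split_assert_blocks lines out) := by unfold Spec_split_assert_blocks; infer_instance

-- ===== CLAIM (what is proved, stated in full; the proofs are below) =====
def Claim_equal_split_assert_blocks : Prop := ∀ (lines : List String), Dom_split_assert_blocks lines → Spec_split_assert_blocks lines (split_assert_blocks lines)

-- ===== LEMMAS AND PROOFS =====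

-- while A is not inside an assert, the leftover balance/current_block do not matter
theorem foldl_stepA_not_in (rest : List String) :
    ∀ alls nons b c b' c',
      ((rest.foldl stepA (alls, nons, false, b, c)).2.1, (rest.foldl stepA (alls, nons, false, b, c)).1)
        = ((rest.foldl stepA (alls, nons, false, b', c')).2.1, (rest.foldl stepA (alls, nons, false, b', c')).1) := by
  induction rest with
  | nil => intro _ _ _ _ _ _; rfl
  | cons l t ih =>
    intro alls nons b c b' c'
    rw [List.foldl_cons, List.foldl_cons]
    by_cases h : PySem.Chars.isIn ['(', 'a', 's', 's', 'e', 'r', 't'] l.toList = true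
    · have hstep : ∀ (b0 : Int) (c0 : List String),
          stepA (alls, nons, false, b0, c0) l = (alls, nons, true, parenBalance l, [l]) := by
        intro b0 c0; simp [stepA, PySem.Str.isIn_eq, h]
      rw [hstep, hstep]
    · have hstep : ∀ (b0 : Int) (c0 : List String),
          stepA (alls, nons, false, b0, c0) l = (alls, nons ++ [l], false, b0, c0) := by
        intro b0 c0; simp [stepA, PySem.Str.isIn_eq, h]
      rw [hstep, hstep]
      exact ih alls (nons ++ [l]) b c b' c'

-- shifting closeLoop's index parameter shifts its answer
theorem closeLoop_shift (rest : List String) :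
    ∀ depth j, closeLoop depth j rest = (closeLoop depth 0 rest).map (j + ·) := by
  induction rest with
  | nil => intro _ _; rfl
  | cons l t ih =>
    intro depth j
    simp only [closeLoop]
    by_cases h : depth + parenBalance l = 0
    · simp [h]
    · simp only [if_neg h]
      rw [ih _ (j + 1), ih _ 1]
      cases closeLoop (depth + parenBalance l) 0 t with
      | none => rfl
      | some m => simp only [Option.map_some]; congr 1; omega

-- A's in-assert phase, matched against B's closing search (with offsets from 0)
theorem foldl_stepA_in (S : List String) :
    ∀ bal cur alls nons,
      ((S.foldl stepA (alls, nons, true, bal, cur)).2.1, (S.foldl stepA (alls, nons, true, bal, cur)).1)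
        = (match closeLoop bal 0 S with
           | none => (nons, alls)
           | some m =>
             (((S.drop (m + 1)).foldl stepA
                 (alls ++ [PySem.Str.join "" (cur ++ S.take (m + 1))], nons, false, 0, [])).2.1,
              ((S.drop (m + 1)).foldl stepA
                 (alls ++ [PySem.Str.join "" (cur ++ S.take (m + 1))], nons, false, 0, [])).1)) := by
  induction S with
  | nil => intro bal cur alls nons; simp [closeLoop]
  | cons l t ih =>
    intro bal cur alls nons
    rw [List.foldl_cons]
    have hstep : stepA (alls, nons, true, bal, cur) l =
        (if bal + parenBalance l = 0
         then (alls ++ [PySem.Str.join "" (cur ++ [l])], nons, false, bal + parenBalance l, cur ++ [l])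
         else (alls, nons, true, bal + parenBalance l, cur ++ [l])) := by
      by_cases h : bal + parenBalance l = 0 <;> simp [stepA, h]
    rw [hstep]
    by_cases h : bal + parenBalance l = 0
    · rw [if_pos h, h]
      have hcl : closeLoop bal 0 (l :: t) = some 0 := by simp [closeLoop, h]
      simp only [hcl, List.take_succ_cons, List.take_zero, List.drop_succ_cons, List.drop_zero]
      exact foldl_stepA_not_in t (alls ++ [PySem.Str.join "" (cur ++ [l])]) nons 0 (cur ++ [l]) 0 []
    · rw [if_neg h]
      have hcl : closeLoop bal 0 (l :: t) = (closeLoop (bal + parenBalance l) 0 t).map (1 + ·) := by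
        simp only [closeLoop, if_neg h]
        exact closeLoop_shift t _ 1
      have hrec := ih (bal + parenBalance l) (cur ++ [l]) alls nons
      rw [hrec]
      cases hm : closeLoop (bal + parenBalance l) 0 t with
      | none => simp [hcl, hm]
      | some m =>
        have h1 : 1 + m + 1 = m + 1 + 1 := by omega
        simp only [hcl, hm, Option.map_some, h1, List.take_succ_cons, List.drop_succ_cons,
          List.append_assoc, List.cons_append, List.nil_append]

-- unfolding lemmas for the well-founded outerAlt
theorem outerAlt_none (other asserts rest : List String) (h : firstAssertIdx rest = none) :
    outerAlt other asserts rest = (other ++ rest, asserts) := by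
  rw [outerAlt.eq_def]
  split
  · rfl
  · rename_i k hk; rw [h] at hk; cases hk

theorem outerAlt_close_none (other asserts rest : List String) (k : Nat)
    (h1 : firstAssertIdx rest = some k) (h2 : closeAt rest k = none) :
    outerAlt other asserts rest = (other ++ rest.take k, asserts) := by
  rw [outerAlt.eq_def]
  split
  · rename_i hk; rw [h1] at hk; cases hk
  · rename_i k' hk; rw [h1] at hk; injection hk with hk; subst hk
    split
    · rfl
    · rename_i e he; rw [h2] at he; cases he

theorem outerAlt_close_some (other asserts rest : List String) (k e : Nat)
    (h1 : firstAssertIdx rest = some k) (h2 : closeAt rest k = some e) :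
    outerAlt other asserts rest =
      outerAlt (other ++ rest.take k)
        (asserts ++ [PySem.Str.join "" ((rest.drop k).take (e + 1 - k))])
        (rest.drop (e + 1)) := by
  rw [outerAlt.eq_def]
  split
  · rename_i hk; rw [h1] at hk; cases hk
  · rename_i k' hk; rw [h1] at hk; injection hk with hk; subst hk
    split
    · rename_i he; rw [h2] at he; cases he
    · rename_i e' he; rw [h2] at he; injection he with he; subst he; rfl

-- prepending a line shifts closeAt's answer by one
theorem closeAt_cons (l : String) (t : List String) (k : Nat) :
    closeAt (l :: t) (k + 1) = (closeAt t k).map (· + 1) := by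
  simp only [closeAt, List.drop_succ_cons]
  rw [closeLoop_shift (t.drop (k + 1)) _ (k + 1 + 1), closeLoop_shift (t.drop (k + 1)) _ (k + 1)]
  cases closeLoop (parenBalance ((t.drop k).headD "")) 0 (t.drop (k + 1)) with
  | none => rfl
  | some m => simp only [Option.map_some]; congr 1; omega

-- the main simulation lemma: A's scan-mode fold = B's outer loop
theorem main_lemma (n : Nat) :
    ∀ (rest : List String), rest.length ≤ n → ∀ alls nons b c,
      ((rest.foldl stepA (alls, nons, false, b, c)).2.1, (rest.foldl stepA (alls, nons, false, b, c)).1)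
        = outerAlt nons alls rest := by
  induction n with
  | zero =>
    intro rest hlen alls nons b c
    have : rest = [] := List.eq_nil_of_length_eq_zero (Nat.le_zero.mp hlen)
    subst this
    rw [outerAlt_none nons alls [] rfl]
    simp
  | succ n ih =>
    intro rest hlen alls nons b c
    cases rest with
    | nil => rw [outerAlt_none nons alls [] rfl]; simp
    | cons l t =>
      have hlt : t.length ≤ n := by simpa using hlen
      rw [List.foldl_cons]
      by_cases h : PySem.Chars.isIn ['(', 'a', 's', 's', 'e', 'r', 't'] l.toList = true
      · -- l opens a block
        have hstep : stepA (alls, nons, false, b, c) l = (alls, nons, true, parenBalance l, [l]) := by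
          simp [stepA, PySem.Str.isIn_eq, h]
        rw [hstep, foldl_stepA_in t (parenBalance l) [l] alls nons]
        have hfirst : firstAssertIdx (l :: t) = some 0 := by
          simp [firstAssertIdx, PySem.Str.isIn_eq, h]
        have hclose : closeAt (l :: t) 0 = (closeLoop (parenBalance l) 0 t).map (1 + ·) := by
          simp only [closeAt, List.drop_zero, List.headD_cons, List.drop_succ_cons]
          exact closeLoop_shift t (parenBalance l) 1
        cases hm : closeLoop (parenBalance l) 0 t with
        | none =>
          rw [outerAlt_close_none nons alls (l :: t) 0 hfirst (by rw [hclose, hm]; rfl)]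
          simp
        | some m =>
          rw [outerAlt_close_some nons alls (l :: t) 0 (1 + m) hfirst (by rw [hclose, hm]; rfl)]
          simp only [List.take_zero, List.append_nil, List.drop_zero]
          have h1 : 1 + m + 1 - 0 = (m + 1) + 1 := by omega
          have h2 : 1 + m + 1 = (m + 1) + 1 := by omega
          rw [h1, h2, List.take_succ_cons, List.drop_succ_cons]
          have hb : (t.drop (m + 1)).length ≤ n :=
            le_trans (by simp) hlt
          rw [ih (t.drop (m + 1)) hb
              (alls ++ [PySem.Str.join "" ([l] ++ t.take (m + 1))]) nons 0 []]
          rfl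
      · -- l is an ordinary line
        have hstep : stepA (alls, nons, false, b, c) l = (alls, nons ++ [l], false, b, c) := by
          simp [stepA, PySem.Str.isIn_eq, h]
        rw [hstep, ih t hlt alls (nons ++ [l]) b c]
        have hfirst : firstAssertIdx (l :: t) = (firstAssertIdx t).map (· + 1) := by
          simp [firstAssertIdx, PySem.Str.isIn_eq, h]
        cases hk : firstAssertIdx t with
        | none =>
          rw [outerAlt_none (nons ++ [l]) alls t hk,
              outerAlt_none nons alls (l :: t) (by rw [hfirst, hk]; rfl)]
          simp
        | some k =>
          have hfc : firstAssertIdx (l :: t) = some (k + 1) := by rw [hfirst, hk]; rfl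
          cases he : closeAt t k with
          | none =>
            rw [outerAlt_close_none (nons ++ [l]) alls t k hk he,
                outerAlt_close_none nons alls (l :: t) (k + 1) hfc
                  (by rw [closeAt_cons, he]; rfl)]
            simp [List.take_succ_cons]
          | some e =>
            rw [outerAlt_close_some (nons ++ [l]) alls t k e hk he,
                outerAlt_close_some nons alls (l :: t) (k + 1) (e + 1) hfc
                  (by rw [closeAt_cons, he]; rfl)]
            have h1 : e + 1 + 1 - (k + 1) = e + 1 - k := by omega
            rw [h1, List.take_succ_cons, List.drop_succ_cons, List.drop_succ_cons]
            simp [List.append_assoc]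

-- ===== VERDICT (by name: the statement is the Claim_ definition above) =====
theorem split_assert_blocks_spec : Claim_equal_split_assert_blocks := by
  intro lines _
  unfold Spec_split_assert_blocks split_assert_blocks split_assert_blocks_alt
  exact main_lemma lines.length lines (Nat.le_refl _) [] [] 0 []
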